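-- pv_equiv track=rewrite | github.com/caiziqing/DFFC-NET | DFFC-Net/Segmentation/Segmentation.py | halfPeekIndex1
-- ===== SOURCE A (Python) =====
-- def halfPeekIndex1(A, halfA, maxAIndex):
--     l = len(A)
--     left = maxAIndex
--     right = maxAIndex
--     for i in range(0, maxAIndex):
--         a = A[i]
--         if a >= halfA:
--             left = i
--             break
--
--     i = l - 1
--     while (i > maxAIndex):
--         a = A[i]
--         if a >= halfA:
--             right = i
--             break
--         i = i - 1
--
--     return left, right
-- ===== SOURCE B (Python) =====
-- def halfPeekIndex1(A, halfA, maxAIndex):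
--     left = maxAIndex
--     right = maxAIndex
--     found = False
--     for i, a in enumerate(A):
--         if a >= halfA:
--             if i < maxAIndex and not found:
--                 left = i
--                 found = True
--             elif i > maxAIndex:
--                 right = i
--     return left, right
-- ===== Notes on version B (the rewrite author's own statement) =====
-- stated objective: simpler
-- what changed: Replaces A's two directional scans (a forward break-scan over range(0, maxAIndex) plus a separate backward while-loop from the end) with one uniform forward pass over enumerate(A) that maintains both the first left-side hit (via a found flag) and the last right-side hit (by overwriting).
-- outside the precondition, e.g. on halfPeekIndex1([0, 0], 1, 5): A raises IndexError, B returns (5, 5); on halfPeekIndex1([0], 1, -4): A raises IndexError, B returns (-4, -4)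
import Mathlib
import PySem

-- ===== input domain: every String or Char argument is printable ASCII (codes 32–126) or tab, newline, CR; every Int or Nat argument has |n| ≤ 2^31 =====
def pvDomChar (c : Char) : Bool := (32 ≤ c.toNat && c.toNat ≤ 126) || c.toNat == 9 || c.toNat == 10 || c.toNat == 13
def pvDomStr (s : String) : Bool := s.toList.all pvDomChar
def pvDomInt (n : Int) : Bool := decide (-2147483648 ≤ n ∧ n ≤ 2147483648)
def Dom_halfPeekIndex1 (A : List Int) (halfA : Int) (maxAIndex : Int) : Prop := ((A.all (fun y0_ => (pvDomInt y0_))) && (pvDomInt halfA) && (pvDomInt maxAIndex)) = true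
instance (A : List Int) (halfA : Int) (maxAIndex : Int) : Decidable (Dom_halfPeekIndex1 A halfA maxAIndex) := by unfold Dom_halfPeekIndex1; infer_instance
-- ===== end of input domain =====

-- B merges A's two separate directional scans (forward break-scan + backward while-scan)
-- into one uniform forward pass over enumerate(A) maintaining both answers; objective: simpler.

-- ===== PORT A =====
-- forward loop 'for i in range(0, maxAIndex): if A[i] >= halfA: left = i; break'
-- (on IndexError — pyGet? = none — Python raises; those inputs are excluded by Pre_; the port returns the default there)
def pvFwd (A : List Int) (halfA : Int) (maxAIndex : Int) (i : Int) : Int :=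
  if _h : i < maxAIndex then
    match PySem.List.pyGet? A i with
    | none => maxAIndex
    | some a => if halfA ≤ a then i else pvFwd A halfA maxAIndex (i + 1)
  else maxAIndex
termination_by (maxAIndex - i).toNat
decreasing_by omega

-- backward loop 'i = l - 1; while i > maxAIndex: if A[i] >= halfA: right = i; break; i -= 1'
def pvBwd (A : List Int) (halfA : Int) (maxAIndex : Int) (i : Int) : Int :=
  if _h : maxAIndex < i then
    match PySem.List.pyGet? A i with
    | none => maxAIndex
    | some a => if halfA ≤ a then i else pvBwd A halfA maxAIndex (i - 1)
  else maxAIndex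
termination_by (i - maxAIndex).toNat
decreasing_by omega

def halfPeekIndex1 (A : List Int) (halfA : Int) (maxAIndex : Int) : Int × Int :=
  (pvFwd A halfA maxAIndex 0, pvBwd A halfA maxAIndex ((A.length : Int) - 1))

-- ===== PORT B =====
-- the body of Source B's single 'for i, a in enumerate(A)' loop
def pvStepB (halfA : Int) (maxAIndex : Int) (st : Int × Bool × Int) (p : Int × Int) : Int × Bool × Int :=
  if halfA ≤ p.2 then
    if p.1 < maxAIndex ∧ st.2.1 = false then (p.1, true, st.2.2)
    else if maxAIndex < p.1 then (st.1, st.2.1, p.1)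
    else st
  else st

def halfPeekIndex1_alt (A : List Int) (halfA : Int) (maxAIndex : Int) : Int × Int :=
  let st := (PySem.List.enumerate A 0).foldl (pvStepB halfA maxAIndex) (maxAIndex, false, maxAIndex)
  (st.1, st.2.2)

-- ===== PRECONDITION & SPEC =====
-- Pre_ excludes exactly the inputs on which Python A raises IndexError: when no element reaches
-- halfA, the forward loop runs past the end if maxAIndex > len(A), and the backward loop runs past
-- the wrapped negative indices if maxAIndex < -len(A) - 1.
def Pre_halfPeekIndex1 (A : List Int) (halfA : Int) (maxAIndex : Int) : Prop :=
  (∃ a ∈ A, halfA ≤ a) ∨ (-(A.length : Int) - 1 ≤ maxAIndex ∧ maxAIndex ≤ (A.length : Int))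
instance (A : List Int) (halfA : Int) (maxAIndex : Int) : Decidable (Pre_halfPeekIndex1 A halfA maxAIndex) := by unfold Pre_halfPeekIndex1; infer_instance
def pvWitness_halfPeekIndex1 : List Int × Int × Int := ([1, 3, 2, 3, 1], 2, 1)

def Spec_halfPeekIndex1 (A : List Int) (halfA : Int) (maxAIndex : Int) (out : Int × Int) : Prop := out = halfPeekIndex1_alt A halfA maxAIndex
instance (A : List Int) (halfA : Int) (maxAIndex : Int) (out : Int × Int) : Decidable (Spec_halfPeekIndex1 A halfA maxAIndex out) := by unfold Spec_halfPeekIndex1; infer_instance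

-- ===== CLAIM (what is proved, stated in full; the proofs are below) =====
def Claim_equal_halfPeekIndex1 : Prop := ∀ (A : List Int) (halfA : Int) (maxAIndex : Int), Dom_halfPeekIndex1 A halfA maxAIndex → Pre_halfPeekIndex1 A halfA maxAIndex → Spec_halfPeekIndex1 A halfA maxAIndex (halfPeekIndex1 A halfA maxAIndex)

-- ===== LEMMAS AND PROOFS =====

-- first index k' ≥ k (scanning L, whose head sits at absolute index k) with h ≤ element and k' < m
def blF (h m : Int) : List Int → Int → Option Int
  | [], _ => none
  | a :: t, k => if h ≤ a ∧ k < m then some k else blF h m t (k + 1)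

-- last index k' ≥ k (same convention) with h ≤ element and m < k'
def brF (h m : Int) : List Int → Int → Option Int
  | [], _ => none
  | a :: t, k =>
    (brF h m t (k + 1)).or (if h ≤ a ∧ m < k then some k else none)

theorem blF_none_of_ge (h m : Int) (L : List Int) : ∀ (k : Int), m ≤ k → blF h m L k = none := by
  induction L with
  | nil => intro k _; rfl
  | cons a t ih =>
    intro k hk
    simp only [blF]
    rw [if_neg (by omega), ih (k + 1) (by omega)]

theorem brF_none_of_le (h m : Int) (L : List Int) : ∀ (k : Int), k + (L.length : Int) ≤ m + 1 → brF h m L k = none := by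
  induction L with
  | nil => intro k _; rfl
  | cons a t ih =>
    intro k hk
    simp only [brF]
    rw [ih (k + 1) (by simp at hk ⊢; omega), if_neg (by simp at hk; omega), Option.none_or]

theorem brF_append_singleton (h m : Int) (L : List Int) (a : Int) : ∀ (k : Int),
    brF h m (L ++ [a]) k =
      if h ≤ a ∧ m < k + (L.length : Int) then some (k + (L.length : Int)) else brF h m L k := by
  induction L with
  | nil => intro k; simp [brF]
  | cons b t ih =>
    intro k
    rw [show brF h m ((b :: t) ++ [a]) k =
        (brF h m (t ++ [a]) (k + 1)).or (if h ≤ b ∧ m < k then some k else none) from rfl,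
      ih (k + 1)]
    simp only [List.length_cons]
    by_cases hc : h ≤ a ∧ m < k + 1 + (t.length : Int)
    · rw [if_pos hc, Option.some_or, if_pos (by push_cast; omega)]
      simp only [Option.some.injEq]
      push_cast
      omega
    · have hc2 : ¬(h ≤ a ∧ m < k + ((t.length + 1 : Nat) : Int)) := by push_cast at hc ⊢; omega
      rw [if_neg hc, if_neg hc2]
      rfl

-- characterisation of A's forward scan
theorem fwd_eq (A : List Int) (h m : Int) : ∀ (fuel : Nat) (k : Nat), (m - (k : Int)).toNat ≤ fuel →
    pvFwd A h m (k : Int) = (blF h m (A.drop k) (k : Int)).getD m := by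
  intro fuel
  induction fuel with
  | zero =>
    intro k hf
    rw [pvFwd, dif_neg (by omega), blF_none_of_ge h m _ _ (by omega)]
    rfl
  | succ f ih =>
    intro k hf
    rw [pvFwd]
    by_cases hkm : (k : Int) < m
    · rw [dif_pos hkm]
      cases hg : PySem.List.pyGet? A ((k : Nat) : Int) with
      | none =>
        have hlen : A.length ≤ k := by
          rw [PySem.List.pyGet?_natCast] at hg
          simpa using hg
        rw [List.drop_eq_nil_of_le hlen]
        rfl
      | some a =>
        have hk : A[k]? = some a := by rw [← PySem.List.pyGet?_natCast]; exact hg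
        have hkl : k < A.length := by
          by_contra hh
          rw [List.getElem?_eq_none (by omega)] at hk
          cases hk
        have hak : A[k] = a := by rwa [List.getElem?_eq_getElem hkl, Option.some.injEq] at hk
        rw [List.drop_eq_getElem_cons hkl]
        simp only [blF, hak]
        by_cases hha : h ≤ a
        · rw [if_pos hha, if_pos ⟨hha, hkm⟩]
          rfl
        · rw [if_neg hha, if_neg (by tauto),
            show ((k : Int) + 1) = ((k + 1 : Nat) : Int) by push_cast; ring,
            ih (k + 1) (by omega)]
    · rw [dif_neg hkm, blF_none_of_ge h m _ _ (by omega)]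
      rfl

-- characterisation of A's backward scan: everything strictly above i has already been
-- scanned without a hit (the habove hypothesis), so the wrapped negative reads never match
theorem bwd_eq (A : List Int) (h m : Int) : ∀ (fuel : Nat) (i : Int), (i - m).toNat ≤ fuel →
    i < (A.length : Int) →
    (∀ (j : Nat) (hj : j < A.length), i < (j : Int) → A[j] < h) →
    pvBwd A h m i = (brF h m (A.take (i + 1).toNat) 0).getD m := by
  intro fuel
  induction fuel with
  | zero =>
    intro i hf hil habove
    rw [pvBwd, dif_neg (by omega)]
    by_cases hi1 : 0 ≤ i + 1
    · rw [brF_none_of_le h m _ 0 (by simp [List.length_take]; omega)]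
      rfl
    · rw [show (i + 1).toNat = 0 by omega]
      rfl
  | succ f ih =>
    intro i hf hil habove
    rw [pvBwd]
    by_cases hmi : m < i
    · rw [dif_pos hmi]
      cases hg : PySem.List.pyGet? A i with
      | none =>
        have hir : ¬ PySem.Raise.InRange A.length i := by
          rw [← PySem.List.pyGet?_eq_none_iff]
          exact hg
        unfold PySem.Raise.InRange at hir
        push Not at hir
        rw [show (i + 1).toNat = 0 by omega, List.take_zero]
        rfl
      | some a =>
        show (if h ≤ a then i else pvBwd A h m (i - 1)) = _
        by_cases hi0 : 0 ≤ i
        · -- in-range nonnegative index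
          have hikl : i.toNat < A.length := by omega
          have hak : A[i.toNat] = a := by
            rw [PySem.List.pyGet?_of_nonneg A hi0, List.getElem?_eq_getElem hikl,
              Option.some.injEq] at hg
            exact hg
          have htake : A.take (i + 1).toNat = A.take i.toNat ++ [A[i.toNat]] := by
            rw [show (i + 1).toNat = i.toNat + 1 by omega, List.take_add_one,
              List.getElem?_eq_getElem hikl]
            rfl
          by_cases hha : h ≤ a
          · rw [if_pos hha, htake, brF_append_singleton,
              if_pos ⟨by rwa [hak], by simp [List.length_take]; omega⟩]
            simp [List.length_take]
            omega
          · rw [if_neg hha, htake, brF_append_singleton,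
              if_neg (by rw [hak]; intro hc; exact hha hc.1),
              show A.take i.toNat = A.take ((i - 1) + 1).toNat by congr 1; omega]
            apply ih (i - 1) (by omega) (by omega)
            intro j hj hij
            by_cases hji : (j : Int) = i
            · have : j = i.toNat := by omega
              subst this
              omega
            · exact habove j hj (by omega)
        · -- negative index: everything above i (= all of A) misses, so the wrapped read misses too
          have hmem : a ∈ A := PySem.List.mem_of_pyGet?_eq_some A hg
          obtain ⟨j, hj, hja⟩ := List.getElem_of_mem hmem
          have hah : a < h := hja ▸ habove j hj (by omega)
          rw [if_neg (by omega),
            show (i + 1).toNat = 0 by omega, List.take_zero,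
            ih (i - 1) (by omega) (by omega) (fun j hj _ => habove j hj (by omega)),
            show (i - 1 + 1).toNat = 0 by omega, List.take_zero]
    · rw [dif_neg hmi]
      by_cases hi1 : 0 ≤ i + 1
      · rw [brF_none_of_le h m _ 0 (by simp [List.length_take]; omega)]
        rfl
      · rw [show (i + 1).toNat = 0 by omega]
        rfl

-- characterisation of B's single fold
theorem foldB_eq (h m : Int) (L : List Int) : ∀ (k left right : Int) (found : Bool),
    (PySem.List.enumerate L k).foldl (pvStepB h m) (left, found, right) =
      ((if found then left else (blF h m L k).getD left),
       (found || (blF h m L k).isSome),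
       ((brF h m L k).getD right)) := by
  induction L with
  | nil => intro k left right found; simp [PySem.List.enumerate_nil, blF, brF]
  | cons a t ih =>
    intro k left right found
    rw [PySem.List.enumerate_cons, List.foldl_cons]
    simp only [blF, brF]
    by_cases hha : h ≤ a
    · by_cases hfst : k < m ∧ found = false
      · have hstep : pvStepB h m (left, found, right) (k, a) = (k, true, right) := by
          simp [pvStepB, hha, hfst]
        rw [hstep, ih, hfst.2]
        simp [hha, hfst.1, show ¬ m < k from by omega]
      · by_cases hmk : m < k
        · have hstep : pvStepB h m (left, found, right) (k, a) = (left, found, k) := by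
            simp only [pvStepB, if_pos hha]
            rw [if_neg hfst, if_pos hmk]
          rw [hstep, ih]
          cases hbr : brF h m t (k + 1) with
          | none => simp [hha, hmk, show ¬ k < m from by omega]
          | some r => simp [hha, hmk, show ¬ k < m from by omega]
        · have hstep : pvStepB h m (left, found, right) (k, a) = (left, found, right) := by
            simp only [pvStepB, if_pos hha]
            rw [if_neg hfst, if_neg hmk]
          rw [hstep, ih]
          by_cases hkm : k < m
          · have hfound : found = true := by
              rcases Bool.eq_false_or_eq_true found with hb | hb
              · exact hb
              · exact absurd ⟨hkm, hb⟩ hfst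
            subst hfound
            simp [hha, hkm, hmk]
          · simp [hha, hkm, hmk]
    · have hstep : pvStepB h m (left, found, right) (k, a) = (left, found, right) := by
        simp [pvStepB, hha]
      rw [hstep, ih]
      simp [hha]

-- ===== VERDICT (by name: the statement is the Claim_ definition above) =====
theorem halfPeekIndex1_spec : Claim_equal_halfPeekIndex1 := by
  intro A h m _ _
  unfold Spec_halfPeekIndex1 halfPeekIndex1 halfPeekIndex1_alt
  rw [foldB_eq]
  have hfwd : pvFwd A h m 0 = (blF h m A 0).getD m := by
    have := fwd_eq A h m (m - 0).toNat 0 (by omega)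
    simpa using this
  have hbwd : pvBwd A h m ((A.length : Int) - 1) = (brF h m A 0).getD m := by
    have := bwd_eq A h m ((A.length : Int) - 1 - m).toNat ((A.length : Int) - 1)
      (by omega) (by omega) (by intro j hj hij; omega)
    rw [this, show ((A.length : Int) - 1 + 1).toNat = A.length by omega, List.take_length]
  simp [hfwd, hbwd]
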